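-- pv_equiv track=rewrite | github.com/yukigolimlim/New_BSV_OCR_AI_ENHANCED | _NEWOCR_AI_ENHANCED/Cibi_populator.py | _fmt_tin
-- ===== SOURCE A (Python) =====
-- def _fmt_tin(tin: str) -> str:
--     if not tin:
--         return ""
--     digits = "".join(c for c in str(tin) if c.isdigit())
--     if not digits:
--         return str(tin)
--     if len(digits) >= 12:
--         d = digits[:12]
--         return f"{d[:3]}-{d[3:6]}-{d[6:9]}-{d[9:12]}"
--     elif len(digits) == 9:
--         return f"{digits[:3]}-{digits[3:6]}-{digits[6:9]}"
--     elif len(digits) > 9: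
--         return f"{digits[:3]}-{digits[3:6]}-{digits[6:9]}-{digits[9:]}"
--     return str(tin)
-- ===== SOURCE B (Python) =====
-- def _fmt_tin(tin: str) -> str:
--     digits = "".join(c for c in str(tin) if c.isdigit())
--     if len(digits) < 9:
--         return str(tin)
--     d = digits[:12]
--     return "-".join(d[i:i+3] for i in range(0, len(d), 3))
-- ===== Notes on version B (the rewrite author's own statement) =====
-- stated objective: simpler
-- what changed: Replaced A's four hardcoded length branches (with per-branch slice formatting) by a single len(digits)<9 fallthrough plus one uniform chunk-into-3-and-join over digits[:12].
import Mathlib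
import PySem

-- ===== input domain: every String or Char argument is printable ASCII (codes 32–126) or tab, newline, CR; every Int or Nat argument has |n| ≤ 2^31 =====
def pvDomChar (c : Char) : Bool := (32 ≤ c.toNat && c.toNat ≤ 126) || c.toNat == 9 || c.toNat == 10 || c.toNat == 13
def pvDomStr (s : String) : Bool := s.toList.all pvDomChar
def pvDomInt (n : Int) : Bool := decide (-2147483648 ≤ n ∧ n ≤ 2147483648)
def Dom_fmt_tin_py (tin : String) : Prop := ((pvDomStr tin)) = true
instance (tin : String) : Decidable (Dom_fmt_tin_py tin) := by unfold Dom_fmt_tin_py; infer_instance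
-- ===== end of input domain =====

-- B replaces A's four hardcoded length branches by one `len(digits) < 9` fallthrough plus a
-- uniform chunk-by-3-and-join over digits[:12] (objective: simpler).

-- ===== PORT A =====
def fmt_tin_py (tin : String) : String :=
  if tin = "" then "" else
  let digits : List Char := tin.toList.filter PySem.Chars.isdigit
  if digits = [] then tin
  else if 12 ≤ digits.length then
    let d := PySem.List.slice digits none (some 12)
    String.ofList (PySem.List.slice d none (some 3) ++ '-' ::
               PySem.List.slice d (some 3) (some 6) ++ '-' ::
               PySem.List.slice d (some 6) (some 9) ++ '-' ::
               PySem.List.slice d (some 9) (some 12))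
  else if digits.length = 9 then
    String.ofList (PySem.List.slice digits none (some 3) ++ '-' ::
               PySem.List.slice digits (some 3) (some 6) ++ '-' ::
               PySem.List.slice digits (some 6) (some 9))
  else if 9 < digits.length then
    String.ofList (PySem.List.slice digits none (some 3) ++ '-' ::
               PySem.List.slice digits (some 3) (some 6) ++ '-' ::
               PySem.List.slice digits (some 6) (some 9) ++ '-' ::
               PySem.List.slice digits (some 9) none)
  else tin

-- ===== PORT B =====
def fmt_tin_py_alt (tin : String) : String :=
  let digits : List Char := tin.toList.filter PySem.Chars.isdigit
  if digits.length < 9 then tin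
  else
    let d := PySem.List.slice digits none (some 12)
    PySem.Str.join "-" ((PySem.List.pyRange 0 (d.length : Int) 3).map
      (fun i => String.ofList (PySem.List.slice d (some i) (some (i + 3)))))

-- ===== PRECONDITION & SPEC =====
def Spec_fmt_tin_py (tin : String) (out : String) : Prop := out = fmt_tin_py_alt tin
instance (tin : String) (out : String) : Decidable (Spec_fmt_tin_py tin out) := by unfold Spec_fmt_tin_py; infer_instance

-- ===== CLAIM (what is proved, stated in full; the proofs are below) =====
def Claim_equal_fmt_tin_py : Prop := ∀ (tin : String), Dom_fmt_tin_py tin → Spec_fmt_tin_py tin (fmt_tin_py tin)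

-- ===== LEMMAS AND PROOFS =====

-- the chunk-and-join of B on a 12-digit list equals A's hardcoded four groups
lemma chunk12 (d : List Char) (hdl : d.length = 12) :
    String.ofList (PySem.List.slice d none (some 3) ++ '-' ::
               PySem.List.slice d (some 3) (some 6) ++ '-' ::
               PySem.List.slice d (some 6) (some 9) ++ '-' ::
               PySem.List.slice d (some 9) (some 12)) =
    PySem.Str.join "-" ((PySem.List.pyRange 0 (d.length : Int) 3).map
      (fun i => String.ofList (PySem.List.slice d (some i) (some (i + 3))))) := by
  rcases d with _|⟨c0,d⟩ <;> simp at hdl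
  rcases d with _|⟨c1,d⟩ <;> simp at hdl
  rcases d with _|⟨c2,d⟩ <;> simp at hdl
  rcases d with _|⟨c3,d⟩ <;> simp at hdl
  rcases d with _|⟨c4,d⟩ <;> simp at hdl
  rcases d with _|⟨c5,d⟩ <;> simp at hdl
  rcases d with _|⟨c6,d⟩ <;> simp at hdl
  rcases d with _|⟨c7,d⟩ <;> simp at hdl
  rcases d with _|⟨c8,d⟩ <;> simp at hdl
  rcases d with _|⟨c9,d⟩ <;> simp at hdl
  rcases d with _|⟨c10,d⟩ <;> simp at hdl
  rcases d with _|⟨c11,d⟩ <;> simp at hdl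
  subst hdl
  simp [PySem.List.slice, PySem.List.clampIdx, PySem.Str.join, PySem.Chars.join,
        PySem.List.pyRange, List.intercalate, List.range_succ]

-- the chunk-and-join of B on a 9-digit list equals A's hardcoded three groups
lemma chunk9 (d : List Char) (hdl : d.length = 9) :
    String.ofList (PySem.List.slice d none (some 3) ++ '-' ::
               PySem.List.slice d (some 3) (some 6) ++ '-' ::
               PySem.List.slice d (some 6) (some 9)) =
    PySem.Str.join "-" ((PySem.List.pyRange 0 (d.length : Int) 3).map
      (fun i => String.ofList (PySem.List.slice d (some i) (some (i + 3))))) := by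
  rcases d with _|⟨c0,d⟩ <;> simp at hdl
  rcases d with _|⟨c1,d⟩ <;> simp at hdl
  rcases d with _|⟨c2,d⟩ <;> simp at hdl
  rcases d with _|⟨c3,d⟩ <;> simp at hdl
  rcases d with _|⟨c4,d⟩ <;> simp at hdl
  rcases d with _|⟨c5,d⟩ <;> simp at hdl
  rcases d with _|⟨c6,d⟩ <;> simp at hdl
  rcases d with _|⟨c7,d⟩ <;> simp at hdl
  rcases d with _|⟨c8,d⟩ <;> simp at hdl
  subst hdl
  simp [PySem.List.slice, PySem.List.clampIdx, PySem.Str.join, PySem.Chars.join,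
        PySem.List.pyRange, List.intercalate, List.range_succ]

-- the chunk-and-join of B on a 10- or 11-digit list equals A's three groups plus remainder
lemma chunk1011 (d : List Char) (hdl : d.length = 10 ∨ d.length = 11) :
    String.ofList (PySem.List.slice d none (some 3) ++ '-' ::
               PySem.List.slice d (some 3) (some 6) ++ '-' ::
               PySem.List.slice d (some 6) (some 9) ++ '-' ::
               PySem.List.slice d (some 9) none) =
    PySem.Str.join "-" ((PySem.List.pyRange 0 (d.length : Int) 3).map
      (fun i => String.ofList (PySem.List.slice d (some i) (some (i + 3))))) := by
  rcases d with _|⟨c0,d⟩ <;> simp at hdl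
  rcases d with _|⟨c1,d⟩ <;> simp at hdl
  rcases d with _|⟨c2,d⟩ <;> simp at hdl
  rcases d with _|⟨c3,d⟩ <;> simp at hdl
  rcases d with _|⟨c4,d⟩ <;> simp at hdl
  rcases d with _|⟨c5,d⟩ <;> simp at hdl
  rcases d with _|⟨c6,d⟩ <;> simp at hdl
  rcases d with _|⟨c7,d⟩ <;> simp at hdl
  rcases d with _|⟨c8,d⟩ <;> simp at hdl
  rcases d with _|⟨c9,d⟩ <;> simp at hdl
  rcases d with _|⟨c10,d⟩
  · simp [PySem.List.slice, PySem.List.clampIdx, PySem.Str.join, PySem.Chars.join,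
          PySem.List.pyRange, List.intercalate, List.range_succ]
  · simp at hdl
    subst hdl
    simp [PySem.List.slice, PySem.List.clampIdx, PySem.Str.join, PySem.Chars.join,
          PySem.List.pyRange, List.intercalate, List.range_succ]

-- ===== VERDICT (by name: the statement is the Claim_ definition above) =====
theorem fmt_tin_py_spec : Claim_equal_fmt_tin_py := by
  intro tin _
  unfold Spec_fmt_tin_py fmt_tin_py fmt_tin_py_alt
  by_cases h0 : tin = ""
  · subst h0; simp
  · simp only [if_neg h0]
    set l := tin.toList.filter PySem.Chars.isdigit with hl
    by_cases hnil : l = []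
    · simp [hnil]
    · simp only [if_neg hnil]
      have hslice : PySem.List.slice l none (some 12) = l.take 12 := by
        rw [PySem.List.slice_to] <;> first | rfl | decide
      by_cases h12 : 12 ≤ l.length
      · have hB : ¬ l.length < 9 := by omega
        simp only [if_pos h12, if_neg hB]
        exact chunk12 _ (by rw [hslice]; simp; omega)
      · simp only [if_neg h12]
        by_cases h9 : l.length = 9
        · have hB : ¬ l.length < 9 := by omega
          simp only [if_pos h9, if_neg hB]
          have heq : PySem.List.slice l none (some 12) = l := by
            rw [hslice]; exact List.take_of_length_le (by omega)
          rw [heq]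
          exact chunk9 _ h9
        · simp only [if_neg h9]
          by_cases h10 : 9 < l.length
          · have hB : ¬ l.length < 9 := by omega
            simp only [if_pos h10, if_neg hB]
            have heq : PySem.List.slice l none (some 12) = l := by
              rw [hslice]; exact List.take_of_length_le (by omega)
            rw [heq]
            exact chunk1011 _ (by omega)
          · have hB : l.length < 9 := by omega
            simp only [if_neg h10, if_pos hB]
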